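-- pv_equiv track=rewrite | github.com/Hunterdii/GeeksforGeeks-POTD | October 2024 GFG SOLUTION/October-22.py | sameOccurrence
-- ===== SOURCE A (Python) =====
-- def sameOccurrence(arr, x, y):
--     diffCount = {}
--     diff = 0
--     result = 0
--
--     diffCount[0] = 1
--
--     for i in arr:
--         if i == x:
--             diff += 1
--         elif i == y:
--             diff -= 1
--
--         result += diffCount.get(diff, 0)
--
--         diffCount[diff] = diffCount.get(diff, 0) + 1
--
--     return result
-- ===== SOURCE B (Python) =====
-- def sameOccurrence(arr, x, y):
--     # Build every prefix-difference (including the initial 0).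
--     prefs = [0]
--     d = 0
--     for v in arr:
--         if v == x:
--             d += 1
--         elif v == y:
--             d -= 1
--         prefs.append(d)
--     # Sort, then count equal runs; each run of length r contributes C(r,2) pairs.
--     prefs.sort()
--     total = 0
--     run = 1
--     prev = prefs[0]
--     for v in prefs[1:]:
--         if v == prev:
--             run += 1
--         else:
--             total += run * (run - 1) // 2
--             run = 1
--             prev = v
--     total += run * (run - 1) // 2
--     return total
-- ===== Notes on version B (the rewrite author's own statement) =====
-- stated objective: alternative
-- what changed: B drops A's hashmap entirely: it materialises the list of prefix-differences, sorts it, and sums C(run,2) over the lengths of equal runs in the sorted list, instead of A's one-pass incremental hash-count accumulation.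
import Mathlib
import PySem

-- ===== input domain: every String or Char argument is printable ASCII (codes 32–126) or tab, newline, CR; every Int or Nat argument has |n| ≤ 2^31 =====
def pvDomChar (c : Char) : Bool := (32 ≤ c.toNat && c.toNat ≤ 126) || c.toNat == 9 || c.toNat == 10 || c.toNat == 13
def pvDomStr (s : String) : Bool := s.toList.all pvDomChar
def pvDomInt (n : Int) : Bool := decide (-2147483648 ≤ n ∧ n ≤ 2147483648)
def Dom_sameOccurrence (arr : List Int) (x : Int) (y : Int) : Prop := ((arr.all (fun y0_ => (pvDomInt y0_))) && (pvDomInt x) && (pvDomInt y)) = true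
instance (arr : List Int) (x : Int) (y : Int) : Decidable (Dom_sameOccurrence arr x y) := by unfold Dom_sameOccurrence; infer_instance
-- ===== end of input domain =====

-- B replaces A's one-pass hashmap counting with sort-then-scan: it materialises all
-- prefix-differences, sorts them, and sums C(run,2) over equal runs (objective: alternative).

-- ===== PORT A =====
-- A's loop state: (diffCount, diff, result); each step updates diff, adds the current
-- count to result, then bumps the table.
def sameOccurrenceStepA (x y : Int) (s : PySem.Dict Int Int × Int × Int) (i : Int) :
    PySem.Dict Int Int × Int × Int :=
  let diff := if i = x then s.2.1 + 1 else if i = y then s.2.1 - 1 else s.2.1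
  let result := s.2.2 + s.1.getD diff 0
  (s.1.insert diff (s.1.getD diff 0 + 1), diff, result)

def sameOccurrence (arr : List Int) (x : Int) (y : Int) : Int :=
  (arr.foldl (sameOccurrenceStepA x y) ((PySem.Dict.empty.insert 0 1), 0, 0)).2.2

-- ===== PORT B =====
-- B's pass 1: append each prefix-difference to prefs; state (prefs, d).
def sameOccurrenceStepP (x y : Int) (s : List Int × Int) (i : Int) : List Int × Int :=
  let d := if i = x then s.2 + 1 else if i = y then s.2 - 1 else s.2
  (s.1 ++ [d], d)

-- B's pass 2 over prefs[1:]: state (total, run, prev).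
def sameOccurrenceStepS (s : Int × Int × Int) (v : Int) : Int × Int × Int :=
  if v = s.2.2 then (s.1, s.2.1 + 1, s.2.2)
  else (s.1 + PySem.Int.floordiv (s.2.1 * (s.2.1 - 1)) 2, 1, v)

def sameOccurrence_alt (arr : List Int) (x : Int) (y : Int) : Int :=
  let prefs := PySem.List.sorted ((arr.foldl (sameOccurrenceStepP x y) ([0], 0)).1) (fun z => z) false
  match prefs with
  | [] => 0   -- unreachable: prefs always contains the initial 0 (Python reads prefs[0])
  | h :: t =>
    let f := t.foldl sameOccurrenceStepS (0, 1, h)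
    f.1 + PySem.Int.floordiv (f.2.1 * (f.2.1 - 1)) 2

-- ===== PRECONDITION & SPEC =====
def Spec_sameOccurrence (arr : List Int) (x : Int) (y : Int) (out : Int) : Prop := out = sameOccurrence_alt arr x y
instance (arr : List Int) (x : Int) (y : Int) (out : Int) : Decidable (Spec_sameOccurrence arr x y out) := by unfold Spec_sameOccurrence; infer_instance

-- ===== CLAIM (what is proved, stated in full; the proofs are below) =====
def Claim_equal_sameOccurrence : Prop := ∀ (arr : List Int) (x : Int) (y : Int), Dom_sameOccurrence arr x y → Spec_sameOccurrence arr x y (sameOccurrence arr x y)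

-- ===== LEMMAS AND PROOFS =====

-- C(c,2) as both programs' arithmetic computes it
def pvPairs (c : Int) : Int := PySem.Int.floordiv (c * (c - 1)) 2

-- the sequence of prefix-differences produced by the shared diff-update, from a start value
def pvDiffs (x y : Int) : Int → List Int → List Int
  | _, [] => []
  | d, i :: t =>
    let d' := if i = x then d + 1 else if i = y then d - 1 else d
    d' :: pvDiffs x y d' t

-- number of equal (i<j) pairs in a list
def pvPairsList : List Int → Int
  | [] => 0
  | a :: t => (t.count a : Int) + pvPairsList t

-- A's accumulation: each element adds its count among all previously seen (seen grows)
def pvG (seen : List Int) : List Int → Int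
  | [] => 0
  | a :: t => (seen.count a : Int) + pvG (seen ++ [a]) t

lemma pvPairs_succ (c : Int) : pvPairs (c + 1) = pvPairs c + c := by
  obtain ⟨m, hm⟩ := Int.even_mul_succ_self (c - 1)
  have hm' : c * (c - 1) = m + m := by linarith [hm]
  have h1 : pvPairs c = m := by
    unfold pvPairs
    rw [PySem.Int.floordiv_eq_ediv_of_pos (by norm_num), hm']
    omega
  have h2 : pvPairs (c + 1) = m + c := by
    unfold pvPairs
    rw [PySem.Int.floordiv_eq_ediv_of_pos (by norm_num)]
    have : (c + 1) * (c + 1 - 1) = (m + c) * 2 := by nlinarith [hm']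
    rw [this, Int.mul_ediv_cancel _ (by norm_num)]
  omega

lemma pvPairsList_perm {l l' : List Int} (h : l.Perm l') : pvPairsList l = pvPairsList l' := by
  induction h with
  | nil => rfl
  | cons a _ ih =>
    rename_i l₁ l₂ _
    simp [pvPairsList, ih, List.Perm.count_eq (by assumption)]
  | swap a b t =>
    simp only [pvPairsList, List.count_cons, beq_iff_eq]
    by_cases hab : a = b
    · subst hab; push_cast; ring
    · simp only [if_neg hab, if_neg (Ne.symm hab)]; push_cast; ring
  | trans _ _ ih₁ ih₂ => exact ih₁.trans ih₂

lemma pvPairsList_replicate (n : Nat) (a : Int) :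
    pvPairsList (List.replicate n a) = pvPairs (n : Int) := by
  induction n with
  | zero => simp [pvPairsList, pvPairs, PySem.Int.floordiv]
  | succ k ih =>
    rw [List.replicate_succ]
    simp only [pvPairsList, List.count_replicate, if_pos (beq_self_eq_true a), ih]
    push_cast
    rw [pvPairs_succ]
    ring

lemma pvPairsList_replicate_append (n : Nat) (a : Int) (l : List Int) (h : a ∉ l) :
    pvPairsList (List.replicate n a ++ l) = pvPairs (n : Int) + pvPairsList l := by
  induction n with
  | zero => simp [pvPairs, PySem.Int.floordiv]
  | succ k ih =>
    rw [List.replicate_succ, List.cons_append]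
    simp only [pvPairsList, List.count_append, List.count_replicate,
      if_pos (beq_self_eq_true a), List.count_eq_zero_of_not_mem h, ih]
    push_cast
    rw [pvPairs_succ]
    ring

-- sum of a singleton-count map is the count
lemma pv_sum_count_single (a : Int) (l : List Int) :
    (l.map (fun e => ((([a] : List Int)).count e : Int))).sum = (l.count a : Int) := by
  induction l with
  | nil => simp
  | cons e t ih =>
    rw [List.map_cons, List.sum_cons, ih]
    by_cases hea : e = a
    · subst hea
      have h1 : ([e] : List Int).count e = 1 := by simp
      have h2 : (e :: t).count e = t.count e + 1 := by simp
      rw [h1, h2]; push_cast; ring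
    · have h1 : ([a] : List Int).count e = 0 := by simp [List.count_singleton']; omega
      have h2 : (e :: t).count a = t.count a := by simp [List.count_cons]; omega
      rw [h1, h2]; push_cast; ring

lemma pvG_eq (l : List Int) : ∀ seen : List Int,
    pvG seen l = (l.map (fun e => (seen.count e : Int))).sum + pvPairsList l := by
  induction l with
  | nil => intro seen; simp [pvG, pvPairsList]
  | cons a t ih =>
    intro seen
    simp only [pvG, pvPairsList, ih (seen ++ [a]), List.map_cons, List.sum_cons]
    have hsplit : (t.map (fun e => (((seen ++ [a]).count e : Nat) : Int))).sum
        = (t.map (fun e => (seen.count e : Int))).sum + (t.count a : Int) := by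
      have : ∀ e : Int, (((seen ++ [a]).count e : Nat) : Int)
          = (seen.count e : Int) + ((([a] : List Int).count e : Nat) : Int) := by
        intro e; rw [List.count_append]; push_cast; ring
      rw [List.map_congr_left (fun e _ => this e)]
      rw [show (fun e => (seen.count e : Int) + ((([a] : List Int).count e : Nat) : Int))
            = (fun e => (fun e => (seen.count e : Int)) e + (fun e => ((([a] : List Int).count e : Nat) : Int)) e) from rfl]
      rw [PySem.List.sum_map_add_int, pv_sum_count_single]
    rw [hsplit]
    ring

-- A's fold computes pvG over the prefix-difference sequence, with the dict tracking counts
lemma pv_A_inv (x y : Int) (l : List Int) :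
    ∀ (d : PySem.Dict Int Int) (diff r : Int) (seen : List Int),
      (∀ v, d.getD v 0 = (seen.count v : Int)) →
      (l.foldl (sameOccurrenceStepA x y) (d, diff, r)).2.2
        = r + pvG seen (pvDiffs x y diff l) := by
  induction l with
  | nil => intro d diff r seen _; simp [pvDiffs, pvG]
  | cons i t ih =>
    intro d diff r seen hd
    simp only [List.foldl_cons]
    set diff' := if i = x then diff + 1 else if i = y then diff - 1 else diff with hdiff'
    have hA : sameOccurrenceStepA x y (d, diff, r) i
        = (d.insert diff' (d.getD diff' 0 + 1), diff', r + d.getD diff' 0) := rfl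
    rw [hA]
    have hd' : ∀ v, (d.insert diff' (d.getD diff' 0 + 1)).getD v 0
        = (((seen ++ [diff']).count v : Nat) : Int) := by
      intro v
      rw [PySem.Dict.getD_insert, List.count_append]
      have hs := hd v
      by_cases hv : v = diff'
      · rw [if_pos hv]
        have h1 : ([diff'] : List Int).count v = 1 := by simp [hv]
        rw [h1, ← hv, hs]
        push_cast; ring
      · rw [if_neg hv]
        have h1 : ([diff'] : List Int).count v = 0 := by simp [List.count_singleton']; omega
        rw [h1, hs]; push_cast; ring
    rw [ih _ _ _ _ hd']
    show r + d.getD diff' 0 + pvG (seen ++ [diff']) (pvDiffs x y diff' t)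
        = r + pvG seen (pvDiffs x y diff (i :: t))
    simp only [pvDiffs, pvG, hd diff']
    ring

-- B's pass 1 appends exactly the prefix-difference sequence
lemma pv_prefs (x y : Int) (l : List Int) :
    ∀ (p : List Int) (d : Int),
      (l.foldl (sameOccurrenceStepP x y) (p, d)).1 = p ++ pvDiffs x y d l := by
  induction l with
  | nil => intro p d; simp [pvDiffs]
  | cons i t ih =>
    intro p d
    simp only [List.foldl_cons, sameOccurrenceStepP, pvDiffs]
    rw [ih]
    simp

-- B's pass 2 on a sorted tail: running state (total, run, prev) represents
-- total + pairs of (run copies of prev ++ rest)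
lemma pv_scan (rest : List Int) :
    ∀ (total run prev : Int), 1 ≤ run →
      rest.Pairwise (· ≤ ·) → (∀ v ∈ rest, prev ≤ v) →
      (rest.foldl sameOccurrenceStepS (total, run, prev)).1
        + pvPairs (rest.foldl sameOccurrenceStepS (total, run, prev)).2.1
        = total + pvPairsList (List.replicate run.toNat prev ++ rest) := by
  induction rest with
  | nil =>
    intro total run prev hrun _ _
    simp only [List.foldl_nil, List.append_nil]
    rw [pvPairsList_replicate]
    rw [Int.toNat_of_nonneg (by omega)]
  | cons v t ih =>
    intro total run prev hrun hpw hle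
    have hpw' := (List.pairwise_cons.mp hpw).2
    have hvle := (List.pairwise_cons.mp hpw).1
    simp only [List.foldl_cons]
    by_cases hv : v = prev
    · subst hv
      have hstep : sameOccurrenceStepS (total, run, v) v = (total, run + 1, v) := by
        simp [sameOccurrenceStepS]
      rw [hstep, ih total (run + 1) v (by omega) hpw' hvle]
      congr 1
      apply pvPairsList_perm
      have hrep : (run + 1).toNat = run.toNat + 1 := by omega
      rw [hrep, List.replicate_succ]
      exact List.perm_middle.symm
    · have hstep : sameOccurrenceStepS (total, run, prev) v
          = (total + PySem.Int.floordiv (run * (run - 1)) 2, 1, v) := by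
        simp [sameOccurrenceStepS, hv]
      rw [hstep, ih _ 1 v (by omega) hpw' hvle]
      have hprevlt : prev < v := lt_of_le_of_ne (hle v (List.mem_cons_self)) (Ne.symm hv)
      have hnot : prev ∉ v :: t := by
        intro hmem
        rcases List.mem_cons.mp hmem with h | h
        · omega
        · exact absurd (hvle prev h) (by omega)
      rw [show List.replicate (1:Int).toNat v ++ t = v :: t from rfl]
      rw [pvPairsList_replicate_append run.toNat prev (v :: t) hnot]
      rw [Int.toNat_of_nonneg (by omega)]
      simp only [pvPairs]
      ring

-- ===== VERDICT (by name: the statement is the Claim_ definition above) =====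
theorem sameOccurrence_spec : Claim_equal_sameOccurrence := by
  intro arr x y _
  unfold Spec_sameOccurrence sameOccurrence sameOccurrence_alt
  -- A's value
  have hd0 : ∀ v : Int, (PySem.Dict.empty.insert (0:Int) (1:Int)).getD v 0
      = ((([0] : List Int).count v : Nat) : Int) := by
    intro v
    rw [PySem.Dict.getD_insert]
    by_cases hv : v = 0
    · subst hv; simp
    · simp [hv, List.count_singleton']
      intro h; exact absurd h.symm hv
  rw [pv_A_inv x y arr _ 0 0 [0] hd0, pvG_eq, pv_sum_count_single]
  -- B's value
  rw [pv_prefs x y arr [0] 0]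
  set L := pvDiffs x y 0 arr with hL
  have hperm : (PySem.List.sorted ([0] ++ L) (fun z => z) false).Perm ([0] ++ L) :=
    PySem.List.sorted_perm _ _ _
  cases hsort : PySem.List.sorted ([0] ++ L) (fun z => z) false with
  | nil =>
    exfalso
    have := PySem.List.sorted_eq_nil_iff ([0] ++ L) (fun z => z) false |>.mp hsort
    simp at this
  | cons h t =>
    have hpw : (h :: t).Pairwise (· ≤ ·) := by
      have := PySem.List.sorted_pairwise ([0] ++ L) (fun z => z)
      rw [hsort] at this
      exact this
    have hpw' := (List.pairwise_cons.mp hpw).2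
    have hvle := (List.pairwise_cons.mp hpw).1
    simp only []
    rw [show (t.foldl sameOccurrenceStepS (0, 1, h)).1
          + PySem.Int.floordiv ((t.foldl sameOccurrenceStepS (0, 1, h)).2.1
            * ((t.foldl sameOccurrenceStepS (0, 1, h)).2.1 - 1)) 2
        = (t.foldl sameOccurrenceStepS (0, 1, h)).1
          + pvPairs (t.foldl sameOccurrenceStepS (0, 1, h)).2.1 from rfl]
    rw [pv_scan t 0 1 h (by omega) hpw' hvle]
    rw [show List.replicate (1:Int).toNat h ++ t = h :: t from rfl]
    have hfinal : pvPairsList (h :: t) = pvPairsList ([0] ++ L) := by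
      apply pvPairsList_perm
      rw [← hsort]; exact hperm
    rw [hfinal]
    simp only [List.singleton_append, pvPairsList]
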